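-- pv_equiv track=rewrite | github.com/DestructHub/ProjectEuler | Problem92/Python/solution_1.py | sequence_end
-- ===== SOURCE A (Python) =====
-- def sequence_end(n, finalnum):
-- 	start = 0
-- 	dic = {}
-- 	end_count = 0
-- 	while start +1 < n:
-- 		start += 1
-- 		if start in dic:
-- 			if dic[start] == finalnum:
-- 				end_count += 1
-- 				continue
-- 			else:
-- 				continue
-- 		end = start
-- 		nums = [end]
-- 		while end != 1 and end != 89:
-- 			end = sum(map(lambda x: x * x, (int(x) for x in str(end))))
-- 			if end in dic:
-- 				end = dic[end]
-- 				break
-- 			else: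
-- 				nums.append(end)
--
-- 		for num in nums:
-- 			dic[num] = end
--
-- 		if end == finalnum:
-- 			end_count += 1
--
-- 	return end_count
-- ===== SOURCE B (Python) =====
-- def sequence_end(n, finalnum):
--     # Fixed 811-entry endpoint table (digit-square-sum of any 10-digit number is <= 810),
--     # then one digit-square-sum hop per number; no per-number memo dict.
--     def dsq(k):
--         s = 0
--         while k:
--             k, d = divmod(k, 10)
--             s += d * d
--         return s
--
--     def endpoint(s):
--         e = s
--         while e != 1 and e != 89:
--             e = dsq(e)
--         return e
--
--     table = [0] + [endpoint(s) for s in range(1, 811)]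
--     count = 0
--     for k in range(1, n):
--         if table[dsq(k)] == finalnum:
--             count += 1
--     return count
-- ===== Notes on version B (the rewrite author's own statement) =====
-- stated objective: faster
-- what changed: Replaces A's lazily-memoized per-number chain walk with an unbounded dict by a fixed 811-entry precomputed endpoint table (the digit-square-sum of any number in the domain is at most 810), so each number needs exactly one digit-square-sum and one table lookup instead of dict probes and chain walks.
import Mathlib
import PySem

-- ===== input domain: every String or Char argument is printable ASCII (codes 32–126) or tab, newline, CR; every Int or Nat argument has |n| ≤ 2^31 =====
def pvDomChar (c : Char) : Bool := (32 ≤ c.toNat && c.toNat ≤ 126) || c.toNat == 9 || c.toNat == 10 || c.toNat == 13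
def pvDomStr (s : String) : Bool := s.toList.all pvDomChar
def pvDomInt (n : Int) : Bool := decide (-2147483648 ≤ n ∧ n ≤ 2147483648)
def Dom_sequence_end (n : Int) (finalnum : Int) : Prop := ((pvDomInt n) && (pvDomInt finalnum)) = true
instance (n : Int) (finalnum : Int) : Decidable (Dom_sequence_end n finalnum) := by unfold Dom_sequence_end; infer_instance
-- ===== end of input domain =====

-- B replaces A's lazily-memoized chain walk (unbounded dict) by a fixed 811-entry
-- precomputed endpoint table plus one digit-square-sum per number (measured faster, constant factor).


-- ===== PORT A =====

-- sum of squares of the decimal digits; ported by hand: A computes it as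
-- `sum(x*x for x in str(end))`, which for the nonnegative `end` A's loop produces
-- equals this base-10 digit recursion exactly (B computes it with divmod, the same recursion).
-- (fuel = k itself, always sufficient since k/10 < k; keeps the definition kernel-reducible)
def dsqFuel : Nat → Nat → Nat
  | 0, _ => 0
  | Nat.succ f, k => if k = 0 then 0 else (k % 10) * (k % 10) + dsqFuel f (k / 10)

def dsqN (k : Nat) : Nat := dsqFuel k k

def dsqZ (e : Int) : Int := (dsqN e.toNat : Int)

-- A's inner `while end != 1 and end != 89` loop with the dict short-circuit.
-- Fueled: Python's loop always terminates on the admitted inputs, and fuel 1000 is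
-- proved sufficient below (the fuel-0 branch is unreachable there).
def innerA (fuel : Nat) (dic : Std.HashMap Int Int) (e : Int) (nums : List Int) :
    Int × List Int :=
  if e ≠ 1 ∧ e ≠ 89 then
    match fuel with
    | 0 => (e, nums)
    | Nat.succ f =>
      match dic[dsqZ e]? with
      | some v => (v, nums)
      | none => innerA f dic (dsqZ e) (nums ++ [dsqZ e])
  else (e, nums)

-- A's outer `while start + 1 < n` loop.
def seqLoop (n finalnum : Int) (start : Int) (dic : Std.HashMap Int Int) (cnt : Int) : Int :=
  if h : start + 1 < n then
    match dic[start + 1]? with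
    | some v => seqLoop n finalnum (start + 1) dic (if v = finalnum then cnt + 1 else cnt)
    | none =>
      match innerA 1000 dic (start + 1) [start + 1] with
      | (e, nums) =>
        seqLoop n finalnum (start + 1) (nums.foldl (fun d m => d.insert m e) dic)
          (if e = finalnum then cnt + 1 else cnt)
  else cnt
termination_by (n - start).toNat
decreasing_by all_goals omega

def sequence_end (n : Int) (finalnum : Int) : Int :=
  seqLoop n finalnum 0 Std.HashMap.emptyWithCapacity 0

-- ===== PORT B =====

-- Source B's `endpoint` while loop, fueled; fuel 100 is proved sufficient on the
-- arguments B feeds it (the fuel-0 branch is unreachable there).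
def chainB (fuel : Nat) (e : Int) : Int :=
  if e ≠ 1 ∧ e ≠ 89 then
    match fuel with
    | 0 => e
    | Nat.succ f => chainB f (dsqZ e)
  else e

-- Source B's `table = [0] + [endpoint(s) for s in range(1, 811)]`
def tableB : List Int := 0 :: (PySem.List.pyRange 1 811 1).map (chainB 100)

-- Source B's counting loop; `table[dsq(k)]` is in range for every k the loop visits
-- inside the domain (dsq(k) ≤ 810 for k < 10^10), so the default 0 is never used there.
def sequence_end_alt (n : Int) (finalnum : Int) : Int :=
  (PySem.List.pyRange 1 n 1).foldl
    (fun cnt k => if PySem.List.pyGetD tableB (dsqZ k) 0 = finalnum then cnt + 1 else cnt) 0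

-- ===== PRECONDITION & SPEC =====
def Spec_sequence_end (n : Int) (finalnum : Int) (out : Int) : Prop := out = sequence_end_alt n finalnum
instance (n : Int) (finalnum : Int) (out : Int) : Decidable (Spec_sequence_end n finalnum out) := by unfold Spec_sequence_end; infer_instance

-- ===== CLAIM (what is proved, stated in full; the proofs are below) =====
def Claim_equal_sequence_end : Prop := ∀ (n : Int) (finalnum : Int), Dom_sequence_end n finalnum → Spec_sequence_end n finalnum (sequence_end n finalnum)

-- ===== LEMMAS AND PROOFS =====

-- `chainHits f e` : the square-digit chain from e reaches 1 or 89 within f steps.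
def chainHits (fuel : Nat) (e : Int) : Bool :=
  match fuel with
  | 0 => e == 1 || e == 89
  | Nat.succ f => e == 1 || e == 89 || chainHits f (dsqZ e)

-- the canonical endpoint value both ports are related to
def CE (e : Int) : Int := chainB 100 e

lemma chainB_terminal (fuel : Nat) (e : Int) (h : e = 1 ∨ e = 89) : chainB fuel e = e := by
  cases fuel <;> simp [chainB] <;> intro h1 <;> rcases h with h | h <;> simp_all

lemma chain_stable : ∀ (f : Nat) (e : Int), chainHits f e = true →
    ∀ g, f ≤ g → chainB g e = chainB f e := by
  intro f
  induction f with
  | zero =>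
    intro e hh g _
    simp only [chainHits, Bool.or_eq_true, beq_iff_eq] at hh
    rw [chainB_terminal g e hh, chainB_terminal 0 e hh]
  | succ f ih =>
    intro e hh g hg
    by_cases ht : e = 1 ∨ e = 89
    · rw [chainB_terminal g e ht, chainB_terminal (f + 1) e ht]
    · push_neg at ht
      simp only [chainHits, Bool.or_eq_true, beq_iff_eq] at hh
      rcases hh with (h | h) | hh
      · exact absurd h ht.1
      · exact absurd h ht.2
      · obtain ⟨g', rfl⟩ : ∃ g', g = g' + 1 := ⟨g - 1, by omega⟩
        rw [chainB, chainB, if_pos ⟨ht.1, ht.2⟩, if_pos ⟨ht.1, ht.2⟩]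
        exact ih (dsqZ e) hh g' (by omega)

lemma dsqFuel_congr : ∀ f g k : Nat, k ≤ f → k ≤ g → dsqFuel f k = dsqFuel g k := by
  intro f
  induction f with
  | zero => intro g k hf _; interval_cases k <;> cases g <;> simp [dsqFuel]
  | succ f ih =>
    intro g k hf hg
    by_cases hk : k = 0
    · subst hk; cases g <;> simp [dsqFuel]
    · obtain ⟨g', rfl⟩ : ∃ g', g = g' + 1 := ⟨g - 1, by omega⟩
      have hlt : k / 10 < k := Nat.div_lt_self (by omega) (by norm_num)
      simp only [dsqFuel, if_neg hk]
      rw [ih g' (k / 10) (by omega) (by omega)]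

lemma dsqN_eq (k : Nat) :
    dsqN k = if k = 0 then 0 else (k % 10) * (k % 10) + dsqN (k / 10) := by
  by_cases hk : k = 0
  · simp [hk, dsqN, dsqFuel]
  · obtain ⟨k', rfl⟩ : ∃ k', k = k' + 1 := ⟨k - 1, by omega⟩
    have hlt : (k' + 1) / 10 < k' + 1 := Nat.div_lt_self (by omega) (by norm_num)
    simp only [dsqN, dsqFuel, if_neg hk]
    rw [dsqFuel_congr k' ((k' + 1) / 10) ((k' + 1) / 10) (by omega) (by omega)]

lemma dsqN_le (d : Nat) : ∀ k : Nat, k < 10 ^ d → dsqN k ≤ 81 * d := by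
  induction d with
  | zero => intro k hk; interval_cases k; simp [dsqN, dsqFuel]
  | succ d ih =>
    intro k hk
    rw [dsqN_eq]
    split
    · omega
    · have h1 : k % 10 ≤ 9 := by omega
      have h2 : k % 10 * (k % 10) ≤ 81 := Nat.le_trans (Nat.mul_le_mul h1 h1) (by norm_num)
      have h3 : k / 10 < 10 ^ d := by
        rw [pow_succ] at hk
        exact Nat.div_lt_of_lt_mul (by omega)
      have := ih (k / 10) h3
      omega

lemma dsqN_pos : ∀ k : Nat, 1 ≤ k → 1 ≤ dsqN k := by
  intro k
  induction k using Nat.strong_induction_on with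
  | _ k ih =>
    intro hk
    rw [dsqN_eq]
    split
    · omega
    · rename_i h
      by_cases h10 : k % 10 = 0
      · have hd : k / 10 < k := Nat.div_lt_self (by omega) (by norm_num)
        have h1 : 1 ≤ k / 10 := by omega
        have := ih (k / 10) hd h1
        omega
      · have : 1 ≤ k % 10 := by omega
        have := Nat.mul_le_mul this this
        omega

lemma dsqZ_bounds (e : Int) (h1 : 1 ≤ e) (h2 : e ≤ 2147483648) :
    1 ≤ dsqZ e ∧ dsqZ e ≤ 810 := by
  have hk1 : 1 ≤ e.toNat := by omega
  have hk2 : e.toNat < 10 ^ 10 := by omega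
  have hle := dsqN_le 10 e.toNat hk2
  have hpos := dsqN_pos e.toNat hk1
  unfold dsqZ
  omega

lemma hits_table : ∀ s : Nat, s < 811 → 1 ≤ s → chainHits 99 (s : Int) = true := by
  have h : ((List.range 811).all fun s => s == 0 || chainHits 99 (s : Int)) = true := by
    set_option maxRecDepth 4000 in decide
  intro s hs h1
  have h2 := List.all_eq_true.mp h s (List.mem_range.mpr hs)
  simp only [Bool.or_eq_true, beq_iff_eq] at h2
  rcases h2 with h2 | h2
  · omega
  · exact h2

lemma hits_dom (e : Int) (h1 : 1 ≤ e) (h2 : e ≤ 2147483648) : chainHits 100 e = true := by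
  show (e == 1 || e == 89 || chainHits 99 (dsqZ e)) = true
  by_cases ht : e = 1 ∨ e = 89
  · rcases ht with h | h <;> simp [h]
  · push_neg at ht
    obtain ⟨hl, hr⟩ := dsqZ_bounds e h1 h2
    have heq : dsqZ e = ((dsqZ e).toNat : Int) := by omega
    have h99 := hits_table (dsqZ e).toNat (by omega) (by omega)
    rw [Bool.or_eq_true, Bool.or_eq_true]
    right
    rw [heq]
    exact h99

lemma CE_step (e : Int) (h1 : 1 ≤ e) (h2 : e ≤ 2147483648) (hn1 : e ≠ 1) (hn89 : e ≠ 89) :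
    CE e = CE (dsqZ e) := by
  obtain ⟨hl, hr⟩ := dsqZ_bounds e h1 h2
  have : CE e = chainB 99 (dsqZ e) := by
    rw [CE, chainB, if_pos ⟨hn1, hn89⟩]
  rw [this]
  have hhits : chainHits 99 (dsqZ e) = true := by
    have heq : dsqZ e = ((dsqZ e).toNat : Int) := by omega
    rw [heq]; exact hits_table (dsqZ e).toNat (by omega) (by omega)
  rw [CE]
  exact (chain_stable 99 (dsqZ e) hhits 100 (by omega)).symm

-- CE absorbs one dsq step for every admitted k, including the terminal ones
lemma CE_dsq (k : Int) (h1 : 1 ≤ k) (h2 : k ≤ 2147483648) : CE (dsqZ k) = CE k := by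
  by_cases ht : k = 1 ∨ k = 89
  · rcases ht with h | h <;> subst h <;> decide
  · push_neg at ht
    exact (CE_step k h1 h2 ht.1 ht.2).symm

-- the dict invariant: every stored value is the true endpoint of its key
def Good (dic : Std.HashMap Int Int) : Prop :=
  ∀ m v, dic[m]? = some v → 1 ≤ m ∧ m ≤ 2147483648 ∧ v = CE m

lemma innerA_spec : ∀ (f fuel : Nat) (dic : Std.HashMap Int Int) (e : Int) (nums : List Int),
    chainHits f e = true → f < fuel → Good dic → 1 ≤ e → e ≤ 2147483648 →
    ∃ extra, innerA fuel dic e nums = (CE e, nums ++ extra) ∧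
      ∀ m ∈ extra, 1 ≤ m ∧ m ≤ 2147483648 ∧ CE m = CE e := by
  intro f
  induction f with
  | zero =>
    intro fuel dic e nums hh _ _ _ _
    simp only [chainHits, Bool.or_eq_true, beq_iff_eq] at hh
    refine ⟨[], ?_, by simp⟩
    rw [innerA.eq_def]
    have : ¬(e ≠ 1 ∧ e ≠ 89) := by rcases hh with h | h <;> simp [h]
    rw [if_neg this, CE, chainB_terminal 100 e hh]
    simp
  | succ f ih =>
    intro fuel dic e nums hh hfuel hgood h1 h2
    by_cases ht : e = 1 ∨ e = 89
    · refine ⟨[], ?_, by simp⟩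
      rw [innerA.eq_def]
      have : ¬(e ≠ 1 ∧ e ≠ 89) := by rcases ht with h | h <;> simp [h]
      rw [if_neg this, CE, chainB_terminal 100 e ht]
      simp
    · push_neg at ht
      simp only [chainHits, Bool.or_eq_true, beq_iff_eq] at hh
      have hh' : chainHits f (dsqZ e) = true := by
        rcases hh with (h | h) | h
        · exact absurd h ht.1
        · exact absurd h ht.2
        · exact h
      obtain ⟨g, rfl⟩ : ∃ g, fuel = g + 1 := ⟨fuel - 1, by omega⟩
      obtain ⟨dl, dr⟩ := dsqZ_bounds e h1 h2
      have hstep := CE_step e h1 h2 ht.1 ht.2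
      rw [innerA.eq_def, if_pos ⟨ht.1, ht.2⟩]
      cases hd : dic[dsqZ e]? with
      | some v =>
        dsimp only
        obtain ⟨_, _, hv⟩ := hgood (dsqZ e) v hd
        exact ⟨[], by simp [hv, hstep], by simp⟩
      | none =>
        obtain ⟨extra, heq, hmem⟩ :=
          ih g dic (dsqZ e) (nums ++ [dsqZ e]) hh' (by omega) hgood dl (by omega)
        refine ⟨dsqZ e :: extra, ?_, ?_⟩
        · simp only [heq, hstep]; simp
        · intro m hm
          rcases List.mem_cons.mp hm with rfl | hm
          · exact ⟨dl, by omega, hstep.symm⟩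
          · obtain ⟨a, b, c⟩ := hmem m hm
            exact ⟨a, b, by rw [c, hstep]⟩

lemma Good_foldl_insert (l : List Int) (w : Int) :
    ∀ dic, Good dic → (∀ m ∈ l, 1 ≤ m ∧ m ≤ 2147483648 ∧ CE m = w) →
    Good (l.foldl (fun d m => d.insert m w) dic) := by
  induction l with
  | nil => intro dic h _; exact h
  | cons x xs ih =>
    intro dic hgood hmem
    simp only [List.foldl_cons]
    refine ih _ ?_ (fun m hm => hmem m (List.mem_cons_of_mem _ hm))
    intro m v hv
    rw [Std.HashMap.getElem?_insert] at hv
    split at hv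
    · obtain ⟨a, b, c⟩ := hmem x (List.mem_cons_self)
      rename_i hmx
      rw [beq_iff_eq] at hmx
      subst hmx
      cases hv
      exact ⟨a, b, c.symm⟩
    · exact hgood m v hv

lemma seqLoop_spec (n finalnum : Int) (hn : n ≤ 2147483648) :
    ∀ (fuel : Nat) (start : Int) (dic : Std.HashMap Int Int) (cnt : Int),
    (n - start).toNat ≤ fuel → 0 ≤ start → Good dic →
    seqLoop n finalnum start dic cnt =
      (PySem.List.pyRange (start + 1) n 1).foldl
        (fun c k => if CE k = finalnum then c + 1 else c) cnt := by
  intro fuel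
  induction fuel with
  | zero =>
    intro start dic cnt hf h0 _
    have hlt : ¬ start + 1 < n := by omega
    rw [seqLoop, dif_neg hlt, PySem.List.pyRange_one_eq_nil (by omega)]
    rfl
  | succ fuel ih =>
    intro start dic cnt hf h0 hgood
    by_cases hlt : start + 1 < n
    · rw [PySem.List.pyRange_one_cons (by omega)]
      have hs1 : 1 ≤ start + 1 := by omega
      have hs2 : start + 1 ≤ 2147483648 := by omega
      rw [seqLoop, dif_pos hlt]
      cases hd : dic[start + 1]? with
      | some v =>
        dsimp only
        obtain ⟨_, _, hv⟩ := hgood (start + 1) v hd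
        rw [ih (start + 1) dic _ (by omega) (by omega) hgood]
        simp only [List.foldl_cons, hv]
      | none =>
        obtain ⟨extra, heq, hmem⟩ :=
          innerA_spec 100 1000 dic (start + 1) [start + 1]
            (hits_dom (start + 1) hs1 hs2) (by omega) hgood hs1 hs2
        dsimp only
        rw [heq]
        dsimp only
        have hall : ∀ m ∈ (start + 1) :: extra,
            1 ≤ m ∧ m ≤ 2147483648 ∧ CE m = CE (start + 1) := by
          intro m hm
          rcases List.mem_cons.mp hm with rfl | hm
          · exact ⟨hs1, hs2, rfl⟩
          · exact hmem m hm
        have hgood' := Good_foldl_insert ((start + 1) :: extra) (CE (start + 1)) dic hgood hall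
        rw [ih (start + 1) _ _ (by omega) (by omega) (by simpa using hgood')]
        simp only [List.foldl_cons]
    · rw [seqLoop, dif_neg hlt, PySem.List.pyRange_one_eq_nil (by omega)]
      rfl

lemma Good_empty : Good Std.HashMap.emptyWithCapacity := by
  intro m v h
  simp at h

-- B's table lookup computes CE (dsqZ k) for every admitted k
lemma tableB_lookup (k : Int) (h1 : 1 ≤ k) (h2 : k ≤ 2147483648) :
    PySem.List.pyGetD tableB (dsqZ k) 0 = CE k := by
  obtain ⟨dl, dr⟩ := dsqZ_bounds k h1 h2
  obtain ⟨m, hm⟩ : ∃ m : Nat, (dsqZ k).toNat = m + 1 := ⟨(dsqZ k).toNat - 1, by omega⟩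
  have hlen : tableB.length = 811 := by
    simp [tableB, PySem.List.length_pyRange_one]
  have hlook : PySem.List.pyGetD tableB (dsqZ k) 0 = chainB 100 (dsqZ k) := by
    rw [PySem.List.pyGetD_eq_getElem tableB 0 (by omega)
      (by simp only [PySem.List.len_eq, hlen]; omega)]
    simp only [tableB, hm, List.getElem_cons_succ, List.getElem_map,
      PySem.List.getElem_pyRange_one]
    congr 1
    omega
  rw [hlook]
  exact CE_dsq k h1 h2

set_option maxRecDepth 8000 in
lemma alt_eq (n finalnum : Int) (hn : n ≤ 2147483648) :
    sequence_end_alt n finalnum =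
      (PySem.List.pyRange 1 n 1).foldl
        (fun c k => if CE k = finalnum then c + 1 else c) 0 := by
  unfold sequence_end_alt
  refine PySem.List.foldl_congr_mem _ _ _ _ ?_
  intro acc x hx
  have hb := (PySem.List.mem_pyRange_one).mp hx
  rw [tableB_lookup x (by omega) (by omega)]

-- ===== VERDICT (by name: the statement is the Claim_ definition above) =====
theorem sequence_end_spec : Claim_equal_sequence_end := by
  intro n finalnum hdom
  unfold Dom_sequence_end pvDomInt at hdom
  simp only [Bool.and_eq_true, decide_eq_true_eq] at hdom
  unfold Spec_sequence_end sequence_end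
  rw [seqLoop_spec n finalnum hdom.1.2 (n - 0).toNat 0 Std.HashMap.emptyWithCapacity 0 (by omega)
    (by omega) Good_empty, alt_eq n finalnum hdom.1.2]
  norm_num
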